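-- pv_equiv track=rewrite | github.com/posl/comment_recommendation | script/mod_gen/2_time/zh/145_D/6.py | solve
-- ===== SOURCE A (Python) =====
-- def solve(X, Y):
--     mod = 10**9 + 7
--     #dp[i][j]表示到达(i, j)的方法数
--     dp = [[0 for _ in range(Y+1)] for _ in range(X+1)]
--     dp[0][0] = 1
--     for i in range(X+1):
--         for j in range(Y+1):
--             if i + 1 <= X and j + 2 <= Y:
--                 dp[i+1][j+2] += dp[i][j]
--                 dp[i+1][j+2] %= mod
--             if i + 2 <= X and j + 1 <= Y:
--                 dp[i+2][j+1] += dp[i][j]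
--                 dp[i+2][j+1] %= mod
--     return dp[X][Y]
-- ===== SOURCE B (Python) =====
-- def solve(X, Y):
--     mod = 10**9 + 7
--     # Every path uses a moves of (1,2) and b moves of (2,1) with a+2b=X, 2a+b=Y;
--     # the answer is the binomial coefficient C(a+b, a) mod p.
--     if (X + Y) % 3:
--         return 0
--     a = (2 * Y - X) // 3
--     b = (2 * X - Y) // 3
--     if a < 0 or b < 0:
--         return 0
--     c = 1
--     for k in range(1, a + 1):
--         c = c * (b + k) // k
--     return c % mod
-- ===== Notes on version B (the rewrite author's own statement) =====
-- stated objective: faster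
-- what changed: Replaces the O(X*Y) grid dynamic program with a closed form: the move counts a=(2Y-X)/3, b=(2X-Y)/3 are solved from a linear system and the answer is the single binomial coefficient C(a+b,a) computed by one multiplicative loop, then reduced mod 10^9+7.
import Mathlib
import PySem

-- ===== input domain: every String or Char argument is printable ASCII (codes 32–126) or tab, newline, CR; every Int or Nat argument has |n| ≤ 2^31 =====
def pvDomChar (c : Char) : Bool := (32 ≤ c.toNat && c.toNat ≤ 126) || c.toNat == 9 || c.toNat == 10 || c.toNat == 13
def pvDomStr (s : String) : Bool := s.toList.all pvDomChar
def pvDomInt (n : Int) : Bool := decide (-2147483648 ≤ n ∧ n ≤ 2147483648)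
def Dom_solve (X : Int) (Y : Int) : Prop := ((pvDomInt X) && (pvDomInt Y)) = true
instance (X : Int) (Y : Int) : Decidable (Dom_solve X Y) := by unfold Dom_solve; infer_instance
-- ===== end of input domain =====

-- B replaces A's O(X*Y) grid DP by a single binomial coefficient C(a+b,a) mod 10^9+7, where
-- a=(2Y-X)/3, b=(2X-Y)/3 are the move counts solved from a+2b=X, 2a+b=Y (objective: faster).

-- ===== PORT A =====
-- Python's 2-D list dp is modelled as Array (Array Int) with total getD/setIfInBounds index
-- helpers (exact for the in-range reads/writes A performs inside Pre_; Pre_ excludes X<0/Y<0,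
-- where Python's dp[0][0] = 1 raises IndexError).
def pvGet2 (dp : Array (Array Int)) (i j : Int) : Int := (dp.getD i.toNat #[]).getD j.toNat 0

def pvSet2 (dp : Array (Array Int)) (i j v : Int) : Array (Array Int) :=
  dp.modify i.toNat (fun row => row.setIfInBounds j.toNat v)

-- body of A's inner loop: the two conditional `dp[..] += dp[i][j]; dp[..] %= mod` updates
def pvStep (X Y md i : Int) (dp : Array (Array Int)) (j : Int) : Array (Array Int) :=
  let dp1 :=
    if i + 1 ≤ X ∧ j + 2 ≤ Y then
      let t := pvSet2 dp (i+1) (j+2) (pvGet2 dp (i+1) (j+2) + pvGet2 dp i j)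
      pvSet2 t (i+1) (j+2) (PySem.Int.mod (pvGet2 t (i+1) (j+2)) md)
    else dp
  if i + 2 ≤ X ∧ j + 1 ≤ Y then
    let t := pvSet2 dp1 (i+2) (j+1) (pvGet2 dp1 (i+2) (j+1) + pvGet2 dp1 i j)
    pvSet2 t (i+2) (j+1) (PySem.Int.mod (pvGet2 t (i+2) (j+1)) md)
  else dp1

def solve (X : Int) (Y : Int) : Int :=
  let md : Int := 10 ^ 9 + 7
  let dp0 : Array (Array Int) :=                      -- dp = [[0 for _ in range(Y+1)] for _ in range(X+1)]
    ((PySem.List.pyRange 0 (X+1) 1).map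
      (fun _ => ((PySem.List.pyRange 0 (Y+1) 1).map (fun _ => (0:Int))).toArray)).toArray
  let dpA := pvSet2 dp0 0 0 1                         -- dp[0][0] = 1
  let dpF := (PySem.List.pyRange 0 (X+1) 1).foldl
    (fun dp i => (PySem.List.pyRange 0 (Y+1) 1).foldl (pvStep X Y md i) dp) dpA
  pvGet2 dpF X Y

-- ===== PORT B =====
def solve_alt (X : Int) (Y : Int) : Int :=
  let md : Int := 10 ^ 9 + 7
  let s := X + Y
  if PySem.Int.mod s 3 ≠ 0 then 0
  else
    let a := PySem.Int.floordiv (2 * Y - X) 3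
    let b := PySem.Int.floordiv (2 * X - Y) 3
    if a < 0 ∨ b < 0 then 0
    else
      let c := (PySem.List.pyRange 1 (a + 1) 1).foldl
        (fun c k => PySem.Int.floordiv (c * (b + k)) k) 1
      PySem.Int.mod c md

-- ===== PRECONDITION & SPEC =====
-- Pre_ excludes X<0 or Y<0, exactly the inputs where Python A raises IndexError at dp[0][0] = 1.
def Pre_solve (X : Int) (Y : Int) : Prop := 0 ≤ X ∧ 0 ≤ Y
instance (X : Int) (Y : Int) : Decidable (Pre_solve X Y) := by unfold Pre_solve; infer_instance
def pvWitness_solve : Int × Int := (3, 3)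

def Spec_solve (X : Int) (Y : Int) (out : Int) : Prop := out = solve_alt X Y
instance (X : Int) (Y : Int) (out : Int) : Decidable (Spec_solve X Y out) := by unfold Spec_solve; infer_instance

-- ===== CLAIM (what is proved, stated in full; the proofs are below) =====
def Claim_equal_solve : Prop := ∀ (X : Int) (Y : Int), Dom_solve X Y → Pre_solve X Y → Spec_solve X Y (solve X Y)

-- ===== LEMMAS AND PROOFS =====

-- ghost model of A's loop: the dp array as a total function Int → Int → Int
def pvUpd (dp : Int → Int → Int) (i j v : Int) : Int → Int → Int :=
  fun a b => if a = i ∧ b = j then v else dp a b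

def pvStepF (X Y md i : Int) (dp : Int → Int → Int) (j : Int) : Int → Int → Int :=
  let dp1 :=
    if i + 1 ≤ X ∧ j + 2 ≤ Y then
      let t := pvUpd dp (i+1) (j+2) (dp (i+1) (j+2) + dp i j)
      pvUpd t (i+1) (j+2) (PySem.Int.mod (t (i+1) (j+2)) md)
    else dp
  if i + 2 ≤ X ∧ j + 1 ≤ Y then
    let t := pvUpd dp1 (i+2) (j+1) (dp1 (i+2) (j+1) + dp1 i j)
    pvUpd t (i+2) (j+1) (PySem.Int.mod (t (i+2) (j+1)) md)
  else dp1

def pvSolveF (X : Int) (Y : Int) : Int :=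
  let md : Int := 10 ^ 9 + 7
  let dp0 : Int → Int → Int := fun _ _ => 0
  let dp1 := pvUpd dp0 0 0 1
  let dpF := (PySem.List.pyRange 0 (X+1) 1).foldl
    (fun dp i => (PySem.List.pyRange 0 (Y+1) 1).foldl (pvStepF X Y md i) dp) dp1
  dpF X Y

-- correspondence between the array dp of the port and the ghost function model
def pvSizes (X Y : Int) (dp : Array (Array Int)) : Prop :=
  dp.size = (X+1).toNat ∧ ∀ r, (h : r < dp.size) → (dp[r]).size = (Y+1).toNat

def pvRel (dp : Array (Array Int)) (f : Int → Int → Int) : Prop :=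
  ∀ a b, 0 ≤ a → 0 ≤ b → pvGet2 dp a b = f a b

lemma sizes_set2 (X Y : Int) (dp : Array (Array Int)) (i j v : Int) (h : pvSizes X Y dp) :
    pvSizes X Y (pvSet2 dp i j v) := by
  obtain ⟨h1, h2⟩ := h
  refine ⟨by simpa [pvSet2] using h1, ?_⟩
  intro r hr
  unfold pvSet2 at hr ⊢
  rw [Array.getElem_modify (by simpa using hr)]
  split_ifs
  · rw [Array.size_setIfInBounds]; exact h2 r (by simpa using hr)
  · exact h2 r (by simpa using hr)


lemma get2_set2 (X Y : Int) (dp : Array (Array Int)) (hs : pvSizes X Y dp) (i j v a b : Int)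
    (hi : 0 ≤ i) (hiX : i ≤ X) (hj : 0 ≤ j) (hjY : j ≤ Y) (ha : 0 ≤ a) (hb : 0 ≤ b) :
    pvGet2 (pvSet2 dp i j v) a b = if a = i ∧ b = j then v else pvGet2 dp a b := by
  obtain ⟨h1, h2⟩ := hs
  unfold pvGet2 pvSet2
  by_cases hrow : a.toNat < dp.size
  · have e1 : (dp.modify i.toNat (fun row => row.setIfInBounds j.toNat v)).getD a.toNat #[]
        = if i.toNat = a.toNat then dp[a.toNat].setIfInBounds j.toNat v else dp[a.toNat] := by
      rw [show (dp.modify i.toNat (fun row => row.setIfInBounds j.toNat v)).getD a.toNat #[]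
          = (dp.modify i.toNat (fun row => row.setIfInBounds j.toNat v))[a.toNat]'(by simpa using hrow)
        from (Array.getElem_eq_getD _).symm]
      rw [Array.getElem_modify (by simpa using hrow)]
    have e2 : dp.getD a.toNat #[] = dp[a.toNat] := (Array.getElem_eq_getD _).symm
    rw [e1, e2]
    have hrowsz : dp[a.toNat].size = (Y+1).toNat := h2 a.toNat hrow
    by_cases hai : a = i
    · rw [if_pos (by omega)]
      by_cases hbcol : b.toNat < dp[a.toNat].size
      · have e3 : (dp[a.toNat].setIfInBounds j.toNat v).getD b.toNat 0
            = if j.toNat = b.toNat then v else dp[a.toNat][b.toNat] := by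
          rw [show (dp[a.toNat].setIfInBounds j.toNat v).getD b.toNat 0
              = (dp[a.toNat].setIfInBounds j.toNat v)[b.toNat]'(by simpa using hbcol)
            from (Array.getElem_eq_getD _).symm]
          rw [Array.getElem_setIfInBounds]
        rw [e3]
        by_cases hbj : b = j
        · rw [if_pos (by omega), if_pos ⟨hai, hbj⟩]
        · rw [if_neg (by omega), if_neg (by tauto),
            show dp[a.toNat].getD b.toNat 0 = dp[a.toNat][b.toNat] from (Array.getElem_eq_getD _).symm]
      · have hbj : ¬ b = j := by omega
        rw [if_neg (by tauto)]
        have o1 : (dp[a.toNat].setIfInBounds j.toNat v).getD b.toNat 0 = 0 := by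
          unfold Array.getD; rw [dif_neg (by simpa [Array.size_setIfInBounds] using hbcol)]
        have o2 : dp[a.toNat].getD b.toNat 0 = 0 := by
          unfold Array.getD; rw [dif_neg hbcol]
        rw [o1, o2]
    · rw [if_neg (by omega), if_neg (by tauto)]
  · have hax : ¬ a = i := by omega
    rw [if_neg (by tauto)]
    have o1 : (dp.modify i.toNat (fun row => row.setIfInBounds j.toNat v)).getD a.toNat #[] = #[] := by
      unfold Array.getD; rw [dif_neg (by simpa [Array.size_modify] using hrow)]
    have o2 : dp.getD a.toNat #[] = #[] := by
      unfold Array.getD; rw [dif_neg hrow]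
    rw [o1, o2]

lemma set2_rel (X Y : Int) (dp : Array (Array Int)) (f : Int → Int → Int)
    (hs : pvSizes X Y dp) (hr : pvRel dp f) (p q v : Int)
    (hp : 0 ≤ p) (hpX : p ≤ X) (hq : 0 ≤ q) (hqY : q ≤ Y) :
    pvRel (pvSet2 dp p q v) (pvUpd f p q v) := by
  intro a b ha hb
  rw [get2_set2 X Y dp hs p q v a b hp hpX hq hqY ha hb]
  unfold pvUpd
  split_ifs with hc
  · rfl
  · exact hr a b ha hb


lemma upd2_rel (X Y md : Int) (dp : Array (Array Int)) (f : Int → Int → Int)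
    (hs : pvSizes X Y dp) (hr : pvRel dp f) (p q r s : Int)
    (hp : 0 ≤ p) (hpX : p ≤ X) (hq : 0 ≤ q) (hqY : q ≤ Y) (hr0 : 0 ≤ r) (hs0 : 0 ≤ s) :
    pvSizes X Y (pvSet2 (pvSet2 dp p q (pvGet2 dp p q + pvGet2 dp r s)) p q
        (PySem.Int.mod (pvGet2 (pvSet2 dp p q (pvGet2 dp p q + pvGet2 dp r s)) p q) md))
    ∧ pvRel (pvSet2 (pvSet2 dp p q (pvGet2 dp p q + pvGet2 dp r s)) p q
        (PySem.Int.mod (pvGet2 (pvSet2 dp p q (pvGet2 dp p q + pvGet2 dp r s)) p q) md))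
        (pvUpd (pvUpd f p q (f p q + f r s)) p q
        (PySem.Int.mod ((pvUpd f p q (f p q + f r s)) p q) md)) := by
  have hv1 : pvGet2 dp p q + pvGet2 dp r s = f p q + f r s := by
    rw [hr p q hp hq, hr r s hr0 hs0]
  have ht1 := set2_rel X Y dp f hs hr p q (f p q + f r s) hp hpX hq hqY
  have hts := sizes_set2 X Y dp p q (f p q + f r s) hs
  rw [hv1]
  have hread : pvGet2 (pvSet2 dp p q (f p q + f r s)) p q = (pvUpd f p q (f p q + f r s)) p q :=
    ht1 p q hp hq
  rw [hread]
  exact ⟨sizes_set2 _ _ _ _ _ _ hts,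
    set2_rel X Y _ _ hts ht1 p q _ hp hpX hq hqY⟩


lemma step_rel (X Y md i j : Int) (hi : 0 ≤ i) (hj : 0 ≤ j)
    (dp : Array (Array Int)) (f : Int → Int → Int) (hs : pvSizes X Y dp) (hr : pvRel dp f) :
    pvSizes X Y (pvStep X Y md i dp j) ∧ pvRel (pvStep X Y md i dp j) (pvStepF X Y md i f j) := by
  unfold pvStep pvStepF
  by_cases g1 : i + 1 ≤ X ∧ j + 2 ≤ Y <;> simp only [g1, if_false]
  · have h1 := upd2_rel X Y md dp f hs hr (i+1) (j+2) i j (by omega) g1.1 (by omega) g1.2 hi hj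
    by_cases g2 : i + 2 ≤ X ∧ j + 1 ≤ Y <;> simp only [g2, if_false]
    · exact upd2_rel X Y md _ _ h1.1 h1.2 (i+2) (j+1) i j (by omega) g2.1 (by omega) g2.2 hi hj
    · exact h1
  · by_cases g2 : i + 2 ≤ X ∧ j + 1 ≤ Y <;> simp only [g2, if_false]
    · exact upd2_rel X Y md dp f hs hr (i+2) (j+1) i j (by omega) g2.1 (by omega) g2.2 hi hj
    · exact ⟨hs, hr⟩


lemma inner_rel (X Y md i : Int) (hi : 0 ≤ i) (m : Nat)
    (dp : Array (Array Int)) (f : Int → Int → Int) (hs : pvSizes X Y dp) (hr : pvRel dp f) :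
    pvSizes X Y ((PySem.List.pyRange 0 (m : Int) 1).foldl (pvStep X Y md i) dp)
    ∧ pvRel ((PySem.List.pyRange 0 (m : Int) 1).foldl (pvStep X Y md i) dp)
        ((PySem.List.pyRange 0 (m : Int) 1).foldl (pvStepF X Y md i) f) := by
  induction m with
  | zero => simpa [PySem.List.pyRange_one_eq_nil (le_refl (0:Int))] using ⟨hs, hr⟩
  | succ m ih =>
    have hcast : ((m+1 : Nat) : Int) = (m : Int) + 1 := by push_cast; ring
    rw [hcast, show PySem.List.pyRange 0 ((m:Int)+1) 1
        = PySem.List.pyRange 0 (m:Int) 1 ++ [(m:Int)] from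
        PySem.List.pyRange_one_succ_right (by positivity), List.foldl_append, List.foldl_append]
    simp only [List.foldl_cons, List.foldl_nil]
    exact step_rel X Y md i (m : Int) hi (by positivity) _ _ ih.1 ih.2


lemma outer_rel (X Y md : Int) (m : Nat)
    (dp : Array (Array Int)) (f : Int → Int → Int) (hs : pvSizes X Y dp) (hr : pvRel dp f) :
    pvSizes X Y ((PySem.List.pyRange 0 (m : Int) 1).foldl
        (fun d i => (PySem.List.pyRange 0 (Y+1) 1).foldl (pvStep X Y md i) d) dp)
    ∧ pvRel ((PySem.List.pyRange 0 (m : Int) 1).foldl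
        (fun d i => (PySem.List.pyRange 0 (Y+1) 1).foldl (pvStep X Y md i) d) dp)
        ((PySem.List.pyRange 0 (m : Int) 1).foldl
        (fun g i => (PySem.List.pyRange 0 (Y+1) 1).foldl (pvStepF X Y md i) g) f) := by
  induction m with
  | zero => simpa [PySem.List.pyRange_one_eq_nil (le_refl (0:Int))] using ⟨hs, hr⟩
  | succ m ih =>
    have hcast : ((m+1 : Nat) : Int) = (m : Int) + 1 := by push_cast; ring
    rw [hcast, show PySem.List.pyRange 0 ((m:Int)+1) 1
        = PySem.List.pyRange 0 (m:Int) 1 ++ [(m:Int)] from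
        PySem.List.pyRange_one_succ_right (by positivity), List.foldl_append, List.foldl_append]
    simp only [List.foldl_cons, List.foldl_nil]
    by_cases hY : 0 ≤ Y + 1
    · have hYc : ((((Y+1).toNat) : Nat) : Int) = Y + 1 := by omega
      have := inner_rel X Y md (m : Int) (by positivity) ((Y+1).toNat) _ _ ih.1 ih.2
      rw [hYc] at this
      exact this
    · have hfix : ∀ {α : Type} (z : α) (l : List Int), List.foldl (fun d (_ : Int) => d) z l = z := by
        intro α z l; induction l generalizing z with
        | nil => rfl
        | cons x xs ihl => simp only [List.foldl_cons]; exact ihl z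
      rw [PySem.List.pyRange_one_eq_nil (by omega)] at ih ⊢
      simp only [List.foldl_nil] at ih ⊢
      rw [hfix, hfix] at ih
      rw [hfix, hfix]
      exact ⟨ih.1, ih.2⟩


lemma solve_eq_ghost (X Y : Int) (hX : 0 ≤ X) (hY : 0 ≤ Y) : solve X Y = pvSolveF X Y := by
  have hs0 : pvSizes X Y (((PySem.List.pyRange 0 (X+1) 1).map
      (fun _ => ((PySem.List.pyRange 0 (Y+1) 1).map (fun _ => (0:Int))).toArray)).toArray) := by
    constructor
    · simp [PySem.List.length_pyRange_one]
    · intro r hr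
      simp only [List.size_toArray, List.length_map] at hr
      rw [List.getElem_toArray, List.getElem_map]
      simp [PySem.List.length_pyRange_one]
  have hr0 : pvRel (((PySem.List.pyRange 0 (X+1) 1).map
      (fun _ => ((PySem.List.pyRange 0 (Y+1) 1).map (fun _ => (0:Int))).toArray)).toArray)
      (fun _ _ => 0) := by
    intro a b ha hb
    unfold pvGet2
    by_cases hrow : a.toNat < (((PySem.List.pyRange 0 (X+1) 1).map
        (fun _ => ((PySem.List.pyRange 0 (Y+1) 1).map (fun _ => (0:Int))).toArray)).toArray).size
    · rw [show (((PySem.List.pyRange 0 (X+1) 1).map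
          (fun _ => ((PySem.List.pyRange 0 (Y+1) 1).map (fun _ => (0:Int))).toArray)).toArray).getD a.toNat #[]
          = (((PySem.List.pyRange 0 (X+1) 1).map
          (fun _ => ((PySem.List.pyRange 0 (Y+1) 1).map (fun _ => (0:Int))).toArray)).toArray)[a.toNat]'hrow
        from (Array.getElem_eq_getD _).symm, List.getElem_toArray, List.getElem_map]
      by_cases hcol : b.toNat < (((PySem.List.pyRange 0 (Y+1) 1).map (fun _ => (0:Int))).toArray).size
      · rw [show (((PySem.List.pyRange 0 (Y+1) 1).map (fun _ => (0:Int))).toArray).getD b.toNat 0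
            = (((PySem.List.pyRange 0 (Y+1) 1).map (fun _ => (0:Int))).toArray)[b.toNat]'hcol
          from (Array.getElem_eq_getD _).symm, List.getElem_toArray, List.getElem_map]
      · unfold Array.getD
        rw [dif_neg hcol]
    · unfold Array.getD
      rw [dif_neg hrow]
      rfl
  have hsA := sizes_set2 X Y _ 0 0 1 hs0
  have hrA := set2_rel X Y _ _ hs0 hr0 0 0 1 le_rfl hX le_rfl hY
  have hXc : ((((X+1).toNat) : Nat) : Int) = X + 1 := by omega
  have hfin := outer_rel X Y (10 ^ 9 + 7) ((X+1).toNat) _ _ hsA hrA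
  rw [hXc] at hfin
  exact hfin.2 X Y hX hY


-- the exact path count: cnt i j = number of (1,2)/(2,1)-move paths from (0,0) to (i,j)
def cnt (i j : Nat) : Nat :=
  if i = 0 ∧ j = 0 then 1
  else (if h1 : 1 ≤ i ∧ 2 ≤ j then cnt (i-1) (j-2) else 0)
     + (if h2 : 2 ≤ i ∧ 1 ≤ j then cnt (i-2) (j-1) else 0)
termination_by i + j
decreasing_by all_goals omega

def cntZ (a b : Int) : Int := (cnt a.toNat b.toNat : Int)

def pvMd : Int := 1000000007

-- value cell (a,b) holds once the cells row-major-before (i,j) have been processed: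
-- the initial 1 at (0,0) plus the full count of each already-processed predecessor
def contrib (i j a b : Int) : Int :=
  (if a = 0 ∧ b = 0 then 1 else 0)
  + (if 0 ≤ a-1 ∧ 0 ≤ b-2 ∧ (a-1 < i ∨ (a-1 = i ∧ b-2 < j)) then cntZ (a-1) (b-2) else 0)
  + (if 0 ≤ a-2 ∧ 0 ≤ b-1 ∧ (a-2 < i ∨ (a-2 = i ∧ b-1 < j)) then cntZ (a-2) (b-1) else 0)

def pvInv (X Y i j : Int) (dp : Int → Int → Int) : Prop :=
  ∀ a b, 0 ≤ a → a ≤ X → 0 ≤ b → b ≤ Y → dp a b = contrib i j a b % pvMd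

lemma cntZ_rec (a b : Int) (ha : 0 ≤ a) (hb : 0 ≤ b) :
    cntZ a b = (if a = 0 ∧ b = 0 then 1 else 0)
      + (if 0 ≤ a-1 ∧ 0 ≤ b-2 then cntZ (a-1) (b-2) else 0)
      + (if 0 ≤ a-2 ∧ 0 ≤ b-1 then cntZ (a-2) (b-1) else 0) := by
  have e1 : (if 0 ≤ a-1 ∧ 0 ≤ b-2 then cntZ (a-1) (b-2) else 0)
      = (if 1 ≤ a.toNat ∧ 2 ≤ b.toNat then (cnt (a.toNat-1) (b.toNat-2) : Int) else 0) := by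
    by_cases hc : 0 ≤ a-1 ∧ 0 ≤ b-2
    · rw [if_pos hc, if_pos (by omega)]; unfold cntZ; congr 2 <;> omega
    · rw [if_neg hc, if_neg (by omega)]
  have e2 : (if 0 ≤ a-2 ∧ 0 ≤ b-1 then cntZ (a-2) (b-1) else 0)
      = (if 2 ≤ a.toNat ∧ 1 ≤ b.toNat then (cnt (a.toNat-2) (b.toNat-1) : Int) else 0) := by
    by_cases hc : 0 ≤ a-2 ∧ 0 ≤ b-1
    · rw [if_pos hc, if_pos (by omega)]; unfold cntZ; congr 2 <;> omega
    · rw [if_neg hc, if_neg (by omega)]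
  rw [e1, e2]
  show (cnt a.toNat b.toNat : Int) = _
  rw [cnt]
  by_cases h0 : a = 0 ∧ b = 0
  · obtain ⟨rfl, rfl⟩ := h0; norm_num
  · rw [if_neg (by omega), if_neg h0]
    simp only [dite_eq_ite]
    push_cast [apply_ite (fun n : Nat => (n : Int))]
    ring

lemma contrib_full (i j a b : Int) (ha : 0 ≤ a) (hb : 0 ≤ b)
    (h1 : 0 ≤ a-1 → 0 ≤ b-2 → (a-1 < i ∨ (a-1 = i ∧ b-2 < j)))
    (h2 : 0 ≤ a-2 → 0 ≤ b-1 → (a-2 < i ∨ (a-2 = i ∧ b-1 < j))) :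
    contrib i j a b = cntZ a b := by
  unfold contrib
  have e1 : (if 0 ≤ a-1 ∧ 0 ≤ b-2 ∧ (a-1 < i ∨ (a-1 = i ∧ b-2 < j)) then cntZ (a-1) (b-2) else 0)
      = (if 0 ≤ a-1 ∧ 0 ≤ b-2 then cntZ (a-1) (b-2) else 0) := by
    by_cases hc : 0 ≤ a-1 ∧ 0 ≤ b-2
    · rw [if_pos ⟨hc.1, hc.2, h1 hc.1 hc.2⟩, if_pos hc]
    · rw [if_neg (by tauto), if_neg hc]
  have e2 : (if 0 ≤ a-2 ∧ 0 ≤ b-1 ∧ (a-2 < i ∨ (a-2 = i ∧ b-1 < j)) then cntZ (a-2) (b-1) else 0)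
      = (if 0 ≤ a-2 ∧ 0 ≤ b-1 then cntZ (a-2) (b-1) else 0) := by
    by_cases hc : 0 ≤ a-2 ∧ 0 ≤ b-1
    · rw [if_pos ⟨hc.1, hc.2, h2 hc.1 hc.2⟩, if_pos hc]
    · rw [if_neg (by tauto), if_neg hc]
  rw [e1, e2, ← cntZ_rec a b ha hb]

lemma contrib_keep (i j a b : Int) (hne1 : ¬(a = i+1 ∧ b = j+2)) (hne2 : ¬(a = i+2 ∧ b = j+1)) :
    contrib i (j+1) a b = contrib i j a b := by
  unfold contrib
  have e1 : (0 ≤ a-1 ∧ 0 ≤ b-2 ∧ (a-1 < i ∨ (a-1 = i ∧ b-2 < j+1)))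
      ↔ (0 ≤ a-1 ∧ 0 ≤ b-2 ∧ (a-1 < i ∨ (a-1 = i ∧ b-2 < j))) := by omega
  have e2 : (0 ≤ a-2 ∧ 0 ≤ b-1 ∧ (a-2 < i ∨ (a-2 = i ∧ b-1 < j+1)))
      ↔ (0 ≤ a-2 ∧ 0 ≤ b-1 ∧ (a-2 < i ∨ (a-2 = i ∧ b-1 < j))) := by omega
  simp only [e1, e2]

lemma contrib_t1 (i j : Int) (hi : 0 ≤ i) (hj : 0 ≤ j) :
    contrib i (j+1) (i+1) (j+2) = contrib i j (i+1) (j+2) + cntZ i j := by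
  unfold contrib
  rw [if_pos (show 0 ≤ i+1-1 ∧ 0 ≤ j+2-2 ∧ (i+1-1 < i ∨ (i+1-1 = i ∧ j+2-2 < j+1)) by omega),
      if_neg (show ¬(0 ≤ i+1-1 ∧ 0 ≤ j+2-2 ∧ (i+1-1 < i ∨ (i+1-1 = i ∧ j+2-2 < j))) by omega)]
  have e2 : (0 ≤ i+1-2 ∧ 0 ≤ j+2-1 ∧ (i+1-2 < i ∨ (i+1-2 = i ∧ j+2-1 < j+1)))
      ↔ (0 ≤ i+1-2 ∧ 0 ≤ j+2-1 ∧ (i+1-2 < i ∨ (i+1-2 = i ∧ j+2-1 < j))) := by omega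
  simp only [e2]
  have : cntZ (i+1-1) (j+2-2) = cntZ i j := by congr 1 <;> ring
  rw [this]; ring

lemma contrib_t2 (i j : Int) (hi : 0 ≤ i) (hj : 0 ≤ j) :
    contrib i (j+1) (i+2) (j+1) = contrib i j (i+2) (j+1) + cntZ i j := by
  unfold contrib
  rw [if_pos (show 0 ≤ i+2-2 ∧ 0 ≤ j+1-1 ∧ (i+2-2 < i ∨ (i+2-2 = i ∧ j+1-1 < j+1)) by omega),
      if_neg (show ¬(0 ≤ i+2-2 ∧ 0 ≤ j+1-1 ∧ (i+2-2 < i ∨ (i+2-2 = i ∧ j+1-1 < j))) by omega)]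
  have e1 : (0 ≤ i+2-1 ∧ 0 ≤ j+1-2 ∧ (i+2-1 < i ∨ (i+2-1 = i ∧ j+1-2 < j+1)))
      ↔ (0 ≤ i+2-1 ∧ 0 ≤ j+1-2 ∧ (i+2-1 < i ∨ (i+2-1 = i ∧ j+1-2 < j))) := by omega
  simp only [e1]
  have : cntZ (i+2-2) (j+1-1) = cntZ i j := by congr 1 <;> ring
  rw [this]; ring

lemma pvStepF_apply (X Y md i : Int) (dp : Int → Int → Int) (j a b : Int) :
    pvStepF X Y md i dp j a b =
      if i + 2 ≤ X ∧ j + 1 ≤ Y ∧ a = i+2 ∧ b = j+1 then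
        PySem.Int.mod (dp (i+2) (j+1) + dp i j) md
      else if i + 1 ≤ X ∧ j + 2 ≤ Y ∧ a = i+1 ∧ b = j+2 then
        PySem.Int.mod (dp (i+1) (j+2) + dp i j) md
      else dp a b := by
  unfold pvStepF pvUpd
  by_cases g1 : i + 1 ≤ X ∧ j + 2 ≤ Y <;> by_cases g2 : i + 2 ≤ X ∧ j + 1 ≤ Y <;>
    simp only [g1, g2, if_false, true_and, and_true, if_pos] <;>
    split_ifs <;> first | rfl | (congr 2 <;> omega)

lemma step_inv (X Y i j : Int) (hi : 0 ≤ i) (hj : 0 ≤ j) (hjY : j ≤ Y)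
    (dp : Int → Int → Int) (h : pvInv X Y i j dp) :
    pvInv X Y i (j+1) (pvStepF X Y pvMd i dp j) := by
  have hmd : (0:Int) < pvMd := by norm_num [pvMd]
  have key : i ≤ X → dp i j = cntZ i j % pvMd := fun hiX => by
    rw [h i j hi hiX hj hjY, contrib_full i j i j hi hj (by omega) (by omega)]
  intro a b ha haX hb hbY
  rw [pvStepF_apply]
  split_ifs with c1 c2
  · obtain ⟨hx, hy, rfl, rfl⟩ := c1
    rw [PySem.Int.mod_eq_emod_of_pos hmd, h (i+2) (j+1) (by omega) hx (by omega) hy,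
      key (by omega), contrib_t2 i j hi hj, Int.add_emod (contrib i j (i+2) (j+1)) (cntZ i j)]
  · obtain ⟨hx, hy, rfl, rfl⟩ := c2
    rw [PySem.Int.mod_eq_emod_of_pos hmd, h (i+1) (j+2) (by omega) hx (by omega) hy,
      key (by omega), contrib_t1 i j hi hj, Int.add_emod (contrib i j (i+1) (j+2)) (cntZ i j)]
  · rw [h a b ha haX hb hbY, contrib_keep i j a b (by omega) (by omega)]

lemma inner_inv (X Y i : Int) (hi : 0 ≤ i) (dp : Int → Int → Int)
    (h : pvInv X Y i 0 dp) (m : Nat) (hm : (m : Int) ≤ Y + 1) :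
    pvInv X Y i (m : Int) ((PySem.List.pyRange 0 (m : Int) 1).foldl (pvStepF X Y pvMd i) dp) := by
  induction m with
  | zero => simpa [PySem.List.pyRange_one_eq_nil (le_refl (0:Int))] using h
  | succ m ih =>
    have hm' : (m : Int) ≤ Y + 1 := by push_cast at hm ⊢; omega
    have hcast : ((m+1 : Nat) : Int) = (m : Int) + 1 := by push_cast; ring
    rw [hcast, PySem.List.pyRange_one_succ_right (by positivity), List.foldl_append]
    exact step_inv X Y i (m : Int) hi (by positivity) (by push_cast at hm; omega) _ (ih hm')

lemma row_advance (X Y i : Int) (dp : Int → Int → Int) (h : pvInv X Y i (Y+1) dp) :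
    pvInv X Y (i+1) 0 dp := by
  intro a b ha haX hb hbY
  rw [h a b ha haX hb hbY]
  unfold contrib
  have e1 : (0 ≤ a-1 ∧ 0 ≤ b-2 ∧ (a-1 < i ∨ (a-1 = i ∧ b-2 < Y+1)))
      ↔ (0 ≤ a-1 ∧ 0 ≤ b-2 ∧ (a-1 < i+1 ∨ (a-1 = i+1 ∧ b-2 < 0))) := by omega
  have e2 : (0 ≤ a-2 ∧ 0 ≤ b-1 ∧ (a-2 < i ∨ (a-2 = i ∧ b-1 < Y+1)))
      ↔ (0 ≤ a-2 ∧ 0 ≤ b-1 ∧ (a-2 < i+1 ∨ (a-2 = i+1 ∧ b-1 < 0))) := by omega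
  simp only [e1, e2]

lemma outer_inv (X Y : Int) (hY : 0 ≤ Y) (dp : Int → Int → Int)
    (h : pvInv X Y 0 0 dp) (m : Nat) :
    pvInv X Y (m : Int) 0 ((PySem.List.pyRange 0 (m : Int) 1).foldl
      (fun dp i => (PySem.List.pyRange 0 (Y+1) 1).foldl (pvStepF X Y pvMd i) dp) dp) := by
  induction m with
  | zero => simpa [PySem.List.pyRange_one_eq_nil (le_refl (0:Int))] using h
  | succ m ih =>
    have hcast : ((m+1 : Nat) : Int) = (m : Int) + 1 := by push_cast; ring
    rw [hcast, show PySem.List.pyRange 0 ((m:Int)+1) 1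
        = PySem.List.pyRange 0 (m:Int) 1 ++ [(m:Int)] from
        PySem.List.pyRange_one_succ_right (by positivity), List.foldl_append]
    simp only [List.foldl_cons, List.foldl_nil]
    apply row_advance
    have hYc : ((((Y+1).toNat) : Nat) : Int) = Y + 1 := by omega
    have := inner_inv X Y (m : Int) (by positivity) _ ih ((Y+1).toNat) (by omega)
    rw [hYc] at this
    exact this

lemma ghost_eq_cnt (X Y : Int) (hX : 0 ≤ X) (hY : 0 ≤ Y) :
    pvSolveF X Y = cntZ X Y % pvMd := by
  have hmd : ((10:Int) ^ 9 + 7) = pvMd := by norm_num [pvMd]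
  show ((PySem.List.pyRange 0 (X+1) 1).foldl
    (fun dp i => (PySem.List.pyRange 0 (Y+1) 1).foldl (pvStepF X Y (10 ^ 9 + 7) i) dp)
    (pvUpd (fun _ _ => 0) 0 0 1)) X Y = _
  rw [hmd]
  have h0 : pvInv X Y 0 0 (pvUpd (fun _ _ => 0) 0 0 1) := by
    intro a b ha haX hb hbY
    unfold pvUpd contrib
    have e1 : ¬(0 ≤ a-1 ∧ 0 ≤ b-2 ∧ (a-1 < 0 ∨ (a-1 = 0 ∧ b-2 < 0))) := by omega
    have e2 : ¬(0 ≤ a-2 ∧ 0 ≤ b-1 ∧ (a-2 < 0 ∨ (a-2 = 0 ∧ b-1 < 0))) := by omega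
    rw [if_neg e1, if_neg e2]
    by_cases hc : a = 0 ∧ b = 0
    · rw [if_pos hc]; norm_num [pvMd]
    · rw [if_neg hc]; norm_num [pvMd]
  have hXc : ((((X+1).toNat) : Nat) : Int) = X + 1 := by omega
  have := outer_inv X Y hY _ h0 ((X+1).toNat)
  rw [hXc] at this
  rw [this X Y hX le_rfl hY le_rfl,
    contrib_full (X+1) 0 X Y hX hY (by omega) (by omega)]

-- closed form for cnt, proved through its Pascal-style recurrence
def gfun (i j : Nat) : Nat :=
  if (i+j) % 3 = 0 ∧ i ≤ 2*j ∧ j ≤ 2*i then Nat.choose ((i+j)/3) ((2*j-i)/3) else 0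

lemma gfun_rec (i j : Nat) (h0 : ¬(i = 0 ∧ j = 0)) :
    gfun i j = (if 1 ≤ i ∧ 2 ≤ j then gfun (i-1) (j-2) else 0)
             + (if 2 ≤ i ∧ 1 ≤ j then gfun (i-2) (j-1) else 0) := by
  by_cases C : (i+j) % 3 = 0 ∧ i ≤ 2*j ∧ j ≤ 2*i
  case neg =>
    have t1 : (if 1 ≤ i ∧ 2 ≤ j then gfun (i-1) (j-2) else 0) = 0 := by
      split_ifs with hg
      · unfold gfun; rw [if_neg (by omega)]
      · rfl
    have t2 : (if 2 ≤ i ∧ 1 ≤ j then gfun (i-2) (j-1) else 0) = 0 := by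
      split_ifs with hg
      · unfold gfun; rw [if_neg (by omega)]
      · rfl
    rw [t1, t2]
    unfold gfun
    rw [if_neg C]
  case pos =>
    obtain ⟨n, k, hik, hj, hkn⟩ : ∃ n k, i + k = 2*n ∧ j = n + k ∧ k ≤ n :=
      ⟨(i+j)/3, (2*j-i)/3, by omega, by omega, by omega⟩
    have hn1 : 1 ≤ n := by omega
    have eL : gfun i j = Nat.choose n k := by
      unfold gfun; rw [if_pos C]; congr 1 <;> omega
    have e1 : (if 1 ≤ i ∧ 2 ≤ j then gfun (i-1) (j-2) else 0)
        = (if 1 ≤ k then Nat.choose (n-1) (k-1) else 0) := by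
      split_ifs with p q q
      · unfold gfun; rw [if_pos (by omega)]; congr 1 <;> omega
      · unfold gfun; rw [if_neg (by omega)]
      · omega
      · rfl
    have e2 : (if 2 ≤ i ∧ 1 ≤ j then gfun (i-2) (j-1) else 0)
        = (if k ≤ n-1 then Nat.choose (n-1) k else 0) := by
      split_ifs with p q q
      · unfold gfun; rw [if_pos (by omega)]; congr 1 <;> omega
      · unfold gfun; rw [if_neg (by omega)]
      · omega
      · rfl
    rw [eL, e1, e2]
    have hn : n - 1 + 1 = n := by omega
    rcases Nat.eq_zero_or_pos k with hk0 | hk1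
    · subst hk0
      rw [if_neg (by omega), if_pos (by omega)]
      simp
    · rcases eq_or_lt_of_le hkn with hkeq | hklt
      · rw [if_pos (by omega : 1 ≤ k), if_neg (by omega), hkeq, Nat.choose_self,
          show n - 1 = k - 1 from by omega, Nat.choose_self]
      · rw [if_pos (by omega : 1 ≤ k), if_pos (by omega)]
        have hk : k - 1 + 1 = k := by omega
        calc Nat.choose n k = Nat.choose (n-1+1) (k-1+1) := by rw [hn, hk]
          _ = Nat.choose (n-1) (k-1) + Nat.choose (n-1) (k-1+1) := Nat.choose_succ_succ _ _
          _ = Nat.choose (n-1) (k-1) + Nat.choose (n-1) k := by rw [hk]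

lemma cnt_eq_gfun : ∀ s i j, i + j = s → cnt i j = gfun i j := by
  intro s
  induction s using Nat.strong_induction_on with
  | _ s ih =>
    intro i j hs
    by_cases h0 : i = 0 ∧ j = 0
    · obtain ⟨rfl, rfl⟩ := h0
      rw [cnt]; simp [gfun]
    · rw [cnt, if_neg h0, gfun_rec i j h0]
      simp only [dite_eq_ite]
      congr 1
      · split_ifs with p
        · exact ih ((i-1)+(j-2)) (by omega) _ _ rfl
        · rfl
      · split_ifs with p
        · exact ih ((i-2)+(j-1)) (by omega) _ _ rfl
        · rfl

lemma cnt_eq_choose (i j : Nat) :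
    cnt i j = if (i+j) % 3 = 0 ∧ i ≤ 2*j ∧ j ≤ 2*i
              then Nat.choose ((i+j)/3) ((2*j-i)/3) else 0 := by
  rw [cnt_eq_gfun (i+j) i j rfl]; rfl

-- B's multiplicative loop computes a binomial coefficient by exact division
lemma fold_choose (bN : Nat) (m : Nat) :
    (PySem.List.pyRange 1 ((m : Int) + 1) 1).foldl
      (fun c k => PySem.Int.floordiv (c * ((bN : Int) + k)) k) 1
    = (Nat.choose (bN + m) m : Int) := by
  induction m with
  | zero => simp [PySem.List.pyRange_one_eq_nil (le_refl (1:Int))]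
  | succ m ih =>
    have hcast : ((m+1 : Nat) : Int) = (m : Int) + 1 := by push_cast; ring
    rw [hcast, show PySem.List.pyRange 1 ((m:Int)+1+1) 1
        = PySem.List.pyRange 1 ((m:Int)+1) 1 ++ [(m:Int)+1] from
        PySem.List.pyRange_one_succ_right (by omega), List.foldl_append]
    simp only [List.foldl_cons, List.foldl_nil, ih]
    have hkey : (Nat.choose (bN + m) m : Int) * ((bN : Int) + ((m:Int)+1))
        = (Nat.choose (bN + (m+1)) (m+1) : Int) * ((m : Int) + 1) := by
      have h2 : (bN + m + 1) * Nat.choose (bN + m) m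
          = Nat.choose (bN + m + 1) (m + 1) * (m + 1) :=
        Nat.add_one_mul_choose_eq (bN + m) m
      have h3 : ((bN + m + 1) * Nat.choose (bN + m) m : Int)
          = (Nat.choose (bN + m + 1) (m + 1) * (m + 1) : Int) := by
        exact_mod_cast congrArg (Nat.cast (R := Int)) h2
      rw [show bN + (m+1) = bN + m + 1 from by omega]
      push_cast at h3 ⊢
      linarith [h3]
    rw [hkey, PySem.Int.floordiv_eq_ediv_of_pos (by positivity),
      Int.mul_ediv_cancel _ (by positivity)]

lemma solve_alt_eq_cnt (X Y : Int) (hX : 0 ≤ X) (hY : 0 ≤ Y) :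
    solve_alt X Y = cntZ X Y % pvMd := by
  show (if PySem.Int.mod (X + Y) 3 ≠ 0 then 0
    else
      if PySem.Int.floordiv (2 * Y - X) 3 < 0 ∨ PySem.Int.floordiv (2 * X - Y) 3 < 0 then 0
      else
        PySem.Int.mod
          ((PySem.List.pyRange 1 (PySem.Int.floordiv (2 * Y - X) 3 + 1) 1).foldl
            (fun c k => PySem.Int.floordiv (c * (PySem.Int.floordiv (2 * X - Y) 3 + k)) k) 1)
          (10 ^ 9 + 7)) = cntZ X Y % pvMd
  by_cases h3 : PySem.Int.mod (X + Y) 3 = 0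
  case neg =>
    rw [if_pos (by exact h3)]
    have hnd : ¬ (3 : Int) ∣ (X + Y) := by
      rw [← PySem.Int.mod_eq_zero_iff_dvd]; exact h3
    have : cnt X.toNat Y.toNat = 0 := by
      rw [cnt_eq_choose, if_neg (by omega)]
    unfold cntZ
    rw [this]
    norm_num
  case pos =>
    rw [if_neg (by simpa using h3)]
    have hdvd : (3 : Int) ∣ (X + Y) := (PySem.Int.mod_eq_zero_iff_dvd _ _).mp h3
    have hA3 : PySem.Int.floordiv (2 * Y - X) 3 * 3 = 2 * Y - X := by
      rw [PySem.Int.floordiv_eq_ediv_of_pos (by norm_num)]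
      exact Int.ediv_mul_cancel (by omega)
    have hB3 : PySem.Int.floordiv (2 * X - Y) 3 * 3 = 2 * X - Y := by
      rw [PySem.Int.floordiv_eq_ediv_of_pos (by norm_num)]
      exact Int.ediv_mul_cancel (by omega)
    set A := PySem.Int.floordiv (2 * Y - X) 3 with hAdef
    set B := PySem.Int.floordiv (2 * X - Y) 3 with hBdef
    by_cases hab : A < 0 ∨ B < 0
    case pos =>
      rw [if_pos hab]
      have : cnt X.toNat Y.toNat = 0 := by
        rw [cnt_eq_choose, if_neg (by omega)]
      unfold cntZ
      rw [this]
      norm_num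
    case neg =>
      rw [if_neg hab]
      have hA : 0 ≤ A := by omega
      have hB : 0 ≤ B := by omega
      rw [show A = ((A.toNat : Nat) : Int) from by omega,
          show B = ((B.toNat : Nat) : Int) from by omega,
          fold_choose B.toNat A.toNat,
          PySem.Int.mod_eq_emod_of_pos (by norm_num)]
      have : cnt X.toNat Y.toNat = Nat.choose (B.toNat + A.toNat) A.toNat := by
        rw [cnt_eq_choose, if_pos (by omega)]
        congr 1 <;> omega
      unfold cntZ
      rw [this]
      norm_num [pvMd]

lemma solve_eq_cnt (X Y : Int) (hX : 0 ≤ X) (hY : 0 ≤ Y) :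
    solve X Y = cntZ X Y % pvMd := by
  rw [solve_eq_ghost X Y hX hY, ghost_eq_cnt X Y hX hY]

-- ===== VERDICT (by name: the statement is the Claim_ definition above) =====
theorem solve_spec : Claim_equal_solve := by
  intro X Y _ hPre
  unfold Spec_solve
  rw [solve_eq_cnt X Y hPre.1 hPre.2, solve_alt_eq_cnt X Y hPre.1 hPre.2]
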